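-- pv_equiv track=rewrite | github.com/Green0v0/TIL | Playdata/핵준특/2017카카오코드예선_보행자천국.py | solution
-- ===== SOURCE A (Python) =====
-- def solution(m,n,city_map):
--     mod = 20170805
--     goRight = [[0] * (n+1) for _ in range(m+1)]
--     goDown = [[0] * (n+1) for _ in range(m+1)]
--     goRight[1][1] = 1
--     goDown[1][1] = 1
--     for i in range(1,m+1):
--         for j in range(1,n+1):
--             if city_map[i-1][j-1] == 0:
--                 goRight[i][j] += (goRight[i-1][j] + goDown[i][j-1]) % mod
--                 goDown[i][j] += (goRight[i-1][j] + goDown[i][j-1]) % mod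
--             elif city_map[i-1][j-1] == 1:
--                 goRight[i][j] = 0
--                 goDown[i][j] = 0
--             else:
--                 goRight[i][j] = goRight[i-1][j]
--                 goDown[i][j] = goDown[i][j-1]
--
--     return (goRight[m-1][n] + goDown[m][n-1]) % mod
-- ===== SOURCE B (Python) =====
-- def solution(m, n, city_map):
--     # Top-down memoized recursion from the target toward the top-left, instead of
--     # A's bottom-up row-major fill of two full tables; the recursion is driven by a
--     # coroutine trampoline so deep grids do not hit Python's recursion limit.
--     mod = 20170805
--     memo = {}
--
--     def pair(i, j):
--         # coroutine: yields the neighbour cells it needs, returns (goRight, goDown) of (i, j)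
--         if i == 0 or j == 0:
--             return (0, 0)
--         c = city_map[i - 1][j - 1]
--         if c == 1:
--             return (0, 0)
--         up = yield (i - 1, j)
--         left = yield (i, j - 1)
--         if c == 0:
--             s = (up[0] + left[1]) % mod
--             return (s + 1, s + 1) if (i, j) == (1, 1) else (s, s)
--         return (up[0], left[1])
--
--     def value(i, j):
--         # trampoline: evaluates pair(i, j), caching every finished cell in memo
--         if (i, j) in memo:
--             return memo[(i, j)]
--         stack = [((i, j), pair(i, j))]
--         sent = None
--         while stack:
--             key, gen = stack[-1]
--             try:
--                 req = gen.send(sent)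
--             except StopIteration as e:
--                 memo[key] = e.value
--                 stack.pop()
--                 sent = e.value
--                 continue
--             if req in memo:
--                 sent = memo[req]
--             else:
--                 stack.append((req, pair(*req)))
--                 sent = None
--         return memo[(i, j)]
--
--     return (value(m - 1, n)[0] + value(m, n - 1)[1]) % mod
-- ===== Notes on version B (the rewrite author's own statement) =====
-- stated objective: alternative
-- what changed: Replaces A's bottom-up row-major fill of two (m+1)x(n+1) tables by a top-down memoized recursion (a coroutine trampoline) that computes each cell's (goRight, goDown) pair on demand from the two target reads, with the start-cell seed folded into the recursion's base case.
import Mathlib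
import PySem

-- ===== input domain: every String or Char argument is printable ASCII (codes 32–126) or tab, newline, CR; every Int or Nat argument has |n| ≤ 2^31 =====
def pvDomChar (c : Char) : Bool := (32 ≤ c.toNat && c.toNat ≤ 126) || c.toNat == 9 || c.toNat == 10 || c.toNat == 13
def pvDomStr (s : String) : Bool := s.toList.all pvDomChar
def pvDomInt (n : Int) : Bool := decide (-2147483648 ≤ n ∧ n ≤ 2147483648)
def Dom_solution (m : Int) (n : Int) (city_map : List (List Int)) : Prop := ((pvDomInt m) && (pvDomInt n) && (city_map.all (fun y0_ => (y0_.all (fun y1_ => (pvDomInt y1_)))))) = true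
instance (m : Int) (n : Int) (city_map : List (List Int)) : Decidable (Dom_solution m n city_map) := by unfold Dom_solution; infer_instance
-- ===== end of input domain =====

-- B replaces A's bottom-up row-major fill of two tables by a top-down memoized recursion
-- computing each cell's (goRight, goDown) pair on demand; same values, same cost (objective: alternative).

-- ===== PORT A =====
-- 2D table access helpers; in-range on every admitted input (Pre_), where Python would also succeed.
def pvGet2 (t : List (List Int)) (i j : Nat) : Int := (t.getD i []).getD j 0
def pvSet2 (t : List (List Int)) (i j : Nat) (v : Int) : List (List Int) := t.set i ((t.getD i []).set j v)

-- body of A's inner loop (state = (goRight, goDown))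
def pvStep (city : List (List Int)) (i : Int) (st : List (List Int) × List (List Int)) (j : Int) : List (List Int) × List (List Int) :=
  let gR := st.1
  let gD := st.2
  let c := pvGet2 city (i-1).toNat (j-1).toNat
  if c = 0 then
    let s := (pvGet2 gR (i-1).toNat j.toNat + pvGet2 gD i.toNat (j-1).toNat) % 20170805
    (pvSet2 gR i.toNat j.toNat (pvGet2 gR i.toNat j.toNat + s),
     pvSet2 gD i.toNat j.toNat (pvGet2 gD i.toNat j.toNat + s))
  else if c = 1 then
    (pvSet2 gR i.toNat j.toNat 0, pvSet2 gD i.toNat j.toNat 0)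
  else
    (pvSet2 gR i.toNat j.toNat (pvGet2 gR (i-1).toNat j.toNat),
     pvSet2 gD i.toNat j.toNat (pvGet2 gD i.toNat (j-1).toNat))

-- body of A's outer loop: one whole row i
def pvRowLoop (city : List (List Int)) (n : Int) (st : List (List Int) × List (List Int)) (i : Int) : List (List Int) × List (List Int) :=
  (PySem.List.pyRange 1 (n+1) 1).foldl (pvStep city i) st

def solution (m : Int) (n : Int) (city_map : List (List Int)) : Int :=
  let init := List.replicate (m+1).toNat (List.replicate (n+1).toNat (0:Int))
  let gR := pvSet2 init 1 1 1
  let gD := pvSet2 init 1 1 1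
  let fin := (PySem.List.pyRange 1 (m+1) 1).foldl (pvRowLoop city_map n) (gR, gD)
  (pvGet2 fin.1 (m-1).toNat n.toNat + pvGet2 fin.2 m.toNat (n-1).toNat) % 20170805

-- ===== PORT B =====
-- Source B's `pair(i, j)` recursion, branch for branch (base row/column 0, then c == 1, then the two
-- recursive reads `up`/`left`, then c == 0 with the (1,1) seed, else the c == 2 pass-through).
-- Source B's memo dict and coroutine trampoline are evaluation devices only — they cache and schedule
-- exactly these recursive calls without changing any value — so the port is this recursion itself.
def pairB (city : List (List Int)) : Nat → Nat → Int × Int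
  | 0, _ => (0, 0)
  | _+1, 0 => (0, 0)
  | i+1, j+1 =>
    let c := pvGet2 city i j
    if c = 1 then (0, 0)
    else
      let up := pairB city i (j+1)
      let left := pairB city (i+1) j
      if c = 0 then
        let s := (up.1 + left.2) % 20170805
        if i = 0 ∧ j = 0 then (s + 1, s + 1) else (s, s)
      else (up.1, left.2)
  termination_by i j => i + j

def solution_alt (m : Int) (n : Int) (city_map : List (List Int)) : Int :=
  ((pairB city_map (m-1).toNat n.toNat).1 + (pairB city_map m.toNat (n-1).toNat).2) % 20170805

-- ===== PRECONDITION & SPEC =====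
-- Pre_ = exactly the inputs where A returns (otherwise Python raises IndexError: m ≤ 0 or n ≤ 0 at
-- goRight[1][1] = 1, or city_map[i-1][j-1] out of range for some visited cell).
def Pre_solution (m : Int) (n : Int) (city_map : List (List Int)) : Prop :=
  1 ≤ m ∧ 1 ≤ n ∧ m ≤ city_map.length ∧ ∀ row ∈ city_map.take m.toNat, n ≤ row.length
instance (m : Int) (n : Int) (city_map : List (List Int)) : Decidable (Pre_solution m n city_map) := by unfold Pre_solution; infer_instance

def pvWitness_solution : Int × Int × List (List Int) := (2, 2, [[0, 0], [2, 0]])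

def Spec_solution (m : Int) (n : Int) (city_map : List (List Int)) (out : Int) : Prop := out = solution_alt m n city_map
instance (m : Int) (n : Int) (city_map : List (List Int)) (out : Int) : Decidable (Spec_solution m n city_map out) := by unfold Spec_solution; infer_instance

-- ===== CLAIM (what is proved, stated in full; the proofs are below) =====
def Claim_equal_solution : Prop := ∀ (m : Int) (n : Int) (city_map : List (List Int)), Dom_solution m n city_map → Pre_solution m n city_map → Spec_solution m n city_map (solution m n city_map)

-- ===== LEMMAS AND PROOFS =====

-- proof-side recursive characterisation of the (goRight, goDown) pair of a cell (A's branch order)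
def pvPair (city : List (List Int)) : Nat → Nat → Int × Int
  | 0, _ => (0, 0)
  | _+1, 0 => (0, 0)
  | i+1, j+1 =>
    let c := pvGet2 city i j
    if c = 0 then
      let s := ((pvPair city i (j+1)).1 + (pvPair city (i+1) j).2) % 20170805
      if i = 0 ∧ j = 0 then (s + 1, s + 1) else (s, s)
    else if c = 1 then (0, 0)
    else ((pvPair city i (j+1)).1, (pvPair city (i+1) j).2)
  termination_by i j => i + j

-- B's recursion and the proof-side spec differ only in branch order
lemma pairB_eq (city : List (List Int)) : ∀ i j, pairB city i j = pvPair city i j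
  | 0, _ => by simp [pairB, pvPair]
  | _+1, 0 => by simp [pairB, pvPair]
  | i+1, j+1 => by
    rw [pairB, pvPair, pairB_eq city i (j+1), pairB_eq city (i+1) j]
    by_cases h0 : pvGet2 city i j = 0
    · simp [h0]
    · by_cases h1 : pvGet2 city i j = 1 <;> simp [h0, h1]
  termination_by i j => i + j

-- intended table contents after rows 1..k are processed and row k+1 is processed through column l
def pvVal (city : List (List Int)) (k l a b : Nat) : Int × Int :=
  if (1 ≤ a ∧ a ≤ k ∧ 1 ≤ b) ∨ (a = k + 1 ∧ 1 ≤ b ∧ b ≤ l) then pvPair city a b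
  else if a = 1 ∧ b = 1 then (1, 1) else (0, 0)

def pvInv (city : List (List Int)) (M N k l : Nat) (st : List (List Int) × List (List Int)) : Prop :=
  st.1.length = M + 1 ∧ st.2.length = M + 1 ∧
  (∀ a, a < M + 1 → (st.1.getD a []).length = N + 1) ∧
  (∀ a, a < M + 1 → (st.2.getD a []).length = N + 1) ∧
  (∀ a b, a ≤ M → b ≤ N →
     pvGet2 st.1 a b = (pvVal city k l a b).1 ∧ pvGet2 st.2 a b = (pvVal city k l a b).2)

lemma length_pvSet2 (t : List (List Int)) (i j : Nat) (v : Int) :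
    (pvSet2 t i j v).length = t.length := by simp [pvSet2]

lemma rowSet_ne (t : List (List Int)) (i j a : Nat) (v : Int) (h : a ≠ i) :
    (pvSet2 t i j v)[a]? = t[a]? := by
  simp [pvSet2, List.getElem?_set_ne (Ne.symm h)]

lemma rowSet_self (t : List (List Int)) (i j : Nat) (v : Int) (h : i < t.length) :
    (pvSet2 t i j v)[i]? = some ((t[i]?.getD []).set j v) := by
  simp [pvSet2, List.getElem?_set_self h, List.getD]

lemma pvGet2_set2_self (t : List (List Int)) (i j : Nat) (v : Int)
    (h1 : i < t.length) (h2 : j < (t.getD i []).length) :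
    pvGet2 (pvSet2 t i j v) i j = v := by
  have h2' : j < (t[i]?.getD []).length := by simpa [List.getD] using h2
  simp [pvGet2, List.getD, rowSet_self t i j v h1, List.getElem?_set_self h2']

lemma pvGet2_set2_ne (t : List (List Int)) (i j a b : Nat) (v : Int)
    (h : a ≠ i ∨ b ≠ j) :
    pvGet2 (pvSet2 t i j v) a b = pvGet2 t a b := by
  rcases h with h | h
  · simp [pvGet2, List.getD, rowSet_ne t i j a v h]
  · by_cases ha : a = i
    · subst ha
      by_cases hl : a < t.length
      · simp [pvGet2, List.getD, rowSet_self t a j v hl, List.getElem?_set_ne (Ne.symm h)]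
      · simp [pvSet2, pvGet2, List.set_eq_of_length_le (Nat.le_of_not_lt hl)]
    · simp [pvGet2, List.getD, rowSet_ne t i j a v ha]

lemma pvVal_shift (city : List (List Int)) (k l a b : Nat) (h : ¬(a = k + 1 ∧ b = l + 1)) :
    pvVal city k (l+1) a b = pvVal city k l a b := by
  unfold pvVal; split_ifs <;> first | rfl | omega

lemma pvVal_row_done (city : List (List Int)) (k N a b : Nat) (hb : b ≤ N) :
    pvVal city k N a b = pvVal city (k+1) 0 a b := by
  unfold pvVal; split_ifs <;> first | rfl | omega

lemma pvVal_read_up (city : List (List Int)) (k l b : Nat) (hb : 1 ≤ b) :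
    (pvVal city k l k b).1 = (pvPair city k b).1 := by
  unfold pvVal
  rcases Nat.eq_zero_or_pos k with hk | hk
  · subst hk
    rw [if_neg (by omega), if_neg (by omega)]
    simp [pvPair]
  · rw [if_pos (Or.inl ⟨hk, Nat.le_refl k, hb⟩)]

lemma pvVal_read_left (city : List (List Int)) (k l : Nat) :
    (pvVal city k l (k+1) l).2 = (pvPair city (k+1) l).2 := by
  unfold pvVal
  rcases Nat.eq_zero_or_pos l with hl | hl
  · subst hl
    rw [if_neg (by omega), if_neg (by omega)]
    simp [pvPair]
  · rw [if_pos (Or.inr ⟨rfl, hl, Nat.le_refl l⟩)]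

lemma pvVal_target_old (city : List (List Int)) (k l : Nat) :
    pvVal city k l (k+1) (l+1) = if k = 0 ∧ l = 0 then ((1:Int), (1:Int)) else (0, 0) := by
  unfold pvVal
  rw [if_neg (by omega)]
  split_ifs <;> first | rfl | omega

lemma inv_step (city : List (List Int)) (M N k l : Nat)
    (st : List (List Int) × List (List Int)) (hk : k < M) (hl : l < N)
    (h : pvInv city M N k l st) :
    pvInv city M N k (l+1) (pvStep city ((k:Int)+1) st ((l:Int)+1)) := by
  obtain ⟨h1, h2, h3, h4, h5⟩ := h
  have e1 : (((k:Int)+1)-1).toNat = k := by omega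
  have e2 : ((k:Int)+1).toNat = k + 1 := by omega
  have e3 : (((l:Int)+1)-1).toNat = l := by omega
  have e4 : ((l:Int)+1).toNat = l + 1 := by omega
  have hup : pvGet2 st.1 k (l+1) = (pvPair city k (l+1)).1 := by
    rw [(h5 k (l+1) (by omega) (by omega)).1, pvVal_read_up city k l (l+1) (by omega)]
  have hleft : pvGet2 st.2 (k+1) l = (pvPair city (k+1) l).2 := by
    rw [(h5 (k+1) l (by omega) (by omega)).2, pvVal_read_left city k l]
  have hold1 : pvGet2 st.1 (k+1) (l+1) = if k = 0 ∧ l = 0 then 1 else 0 := by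
    rw [(h5 (k+1) (l+1) (by omega) (by omega)).1, pvVal_target_old]
    split_ifs <;> rfl
  have hold2 : pvGet2 st.2 (k+1) (l+1) = if k = 0 ∧ l = 0 then 1 else 0 := by
    rw [(h5 (k+1) (l+1) (by omega) (by omega)).2, pvVal_target_old]
    split_ifs <;> rfl
  have hpe : pvPair city (k+1) (l+1)
      = (if pvGet2 city k l = 0 then
           (if k = 0 ∧ l = 0 then
              (((pvPair city k (l+1)).1 + (pvPair city (k+1) l).2) % 20170805 + 1,
               ((pvPair city k (l+1)).1 + (pvPair city (k+1) l).2) % 20170805 + 1)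
            else
              (((pvPair city k (l+1)).1 + (pvPair city (k+1) l).2) % 20170805,
               ((pvPair city k (l+1)).1 + (pvPair city (k+1) l).2) % 20170805))
         else if pvGet2 city k l = 1 then (0, 0)
         else ((pvPair city k (l+1)).1, (pvPair city (k+1) l).2)) := by
    rw [pvPair]
  have hstep : pvStep city ((k:Int)+1) st ((l:Int)+1)
      = (pvSet2 st.1 (k+1) (l+1) (pvPair city (k+1) (l+1)).1,
         pvSet2 st.2 (k+1) (l+1) (pvPair city (k+1) (l+1)).2) := by
    unfold pvStep
    simp only [e1, e2, e3, e4, hup, hleft, hold1, hold2, hpe]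
    by_cases hc0 : pvGet2 city k l = 0
    · simp only [hc0]
      by_cases hkl : k = 0 ∧ l = 0
      · simp only [hkl]
        simp [Prod.ext_iff]
        constructor <;> · congr 1; ring
      · simp only [hkl]
        simp
    · by_cases hc1 : pvGet2 city k l = 1
      · simp [hc1]
      · simp [hc0, hc1]
  have hin1 : k + 1 < st.1.length := by omega
  have hin2 : k + 1 < st.2.length := by omega
  have hin1' : l + 1 < (st.1.getD (k+1) []).length := by rw [h3 (k+1) (by omega)]; omega
  have hin2' : l + 1 < (st.2.getD (k+1) []).length := by rw [h4 (k+1) (by omega)]; omega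
  rw [hstep]
  refine ⟨by simp [length_pvSet2, h1], by simp [length_pvSet2, h2], ?_, ?_, ?_⟩
  · intro a ha
    by_cases hak : a = k + 1
    · subst hak
      rw [List.getD, rowSet_self _ _ _ _ hin1]
      simpa [List.getD] using h3 (k+1) ha
    · rw [List.getD, rowSet_ne _ _ _ _ _ hak]
      exact h3 a ha
  · intro a ha
    by_cases hak : a = k + 1
    · subst hak
      rw [List.getD, rowSet_self _ _ _ _ hin2]
      simpa [List.getD] using h4 (k+1) ha
    · rw [List.getD, rowSet_ne _ _ _ _ _ hak]
      exact h4 a ha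
  · intro a b ha hb
    by_cases hab : a = k + 1 ∧ b = l + 1
    · obtain ⟨rfl, rfl⟩ := hab
      have hv : pvVal city k (l+1) (k+1) (l+1) = pvPair city (k+1) (l+1) := by
        unfold pvVal
        rw [if_pos (Or.inr ⟨rfl, by omega, by omega⟩)]
      rw [hv, pvGet2_set2_self _ _ _ _ hin1 hin1', pvGet2_set2_self _ _ _ _ hin2 hin2']
      exact ⟨rfl, rfl⟩
    · rw [pvGet2_set2_ne _ _ _ _ _ _ (by tauto), pvGet2_set2_ne _ _ _ _ _ _ (by tauto),
        pvVal_shift city k l a b hab]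
      exact h5 a b ha hb

lemma inv_row (city : List (List Int)) (M N k : Nat)
    (st : List (List Int) × List (List Int)) (hk : k < M)
    (h : pvInv city M N k 0 st) :
    ∀ l, l ≤ N → pvInv city M N k l
      ((PySem.List.pyRange 1 ((l:Int)+1) 1).foldl (pvStep city ((k:Int)+1)) st) := by
  intro l
  induction l with
  | zero =>
    intro _
    rw [PySem.List.pyRange_one_eq_nil (by omega)]
    simpa using h
  | succ l ih =>
    intro hle
    have e : ((((l+1):Nat)):Int) + 1 = (((l:Int)+1)) + 1 := by push_cast; ring
    rw [e, PySem.List.pyRange_one_succ_right (by omega), List.foldl_append]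
    simpa using inv_step city M N k l _ hk (by omega) (ih (by omega))

lemma inv_done (city : List (List Int)) (M N k : Nat)
    (st : List (List Int) × List (List Int)) (h : pvInv city M N k N st) :
    pvInv city M N (k+1) 0 st := by
  obtain ⟨h1, h2, h3, h4, h5⟩ := h
  refine ⟨h1, h2, h3, h4, fun a b ha hb => ?_⟩
  rw [← pvVal_row_done city k N a b hb]
  exact h5 a b ha hb

lemma inv_outer (city : List (List Int)) (M N : Nat)
    (st0 : List (List Int) × List (List Int))
    (h : pvInv city M N 0 0 st0) :
    ∀ k, k ≤ M → pvInv city M N k 0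
      ((PySem.List.pyRange 1 ((k:Int)+1) 1).foldl (pvRowLoop city (N:Int)) st0) := by
  intro k
  induction k with
  | zero =>
    intro _
    rw [PySem.List.pyRange_one_eq_nil (by omega)]
    simpa using h
  | succ k ih =>
    intro hle
    have e : ((((k+1):Nat)):Int) + 1 = (((k:Int)+1)) + 1 := by push_cast; ring
    rw [e, PySem.List.pyRange_one_succ_right (by omega), List.foldl_append]
    have hrow := inv_row city M N k _ (by omega) (ih (by omega)) N (Nat.le_refl N)
    have : pvRowLoop city (N:Int) ((PySem.List.pyRange 1 ((k:Int)+1) 1).foldl (pvRowLoop city (N:Int)) st0) ((k:Int)+1)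
        = (PySem.List.pyRange 1 ((N:Int)+1) 1).foldl (pvStep city ((k:Int)+1))
            ((PySem.List.pyRange 1 ((k:Int)+1) 1).foldl (pvRowLoop city (N:Int)) st0) := rfl
    simpa [this] using inv_done city M N k _ hrow

lemma inv_init (city : List (List Int)) (M N : Nat) (hM : 1 ≤ M) (hN : 1 ≤ N) :
    pvInv city M N 0 0
      (pvSet2 (List.replicate (M+1) (List.replicate (N+1) (0:Int))) 1 1 1,
       pvSet2 (List.replicate (M+1) (List.replicate (N+1) (0:Int))) 1 1 1) := by
  set T := List.replicate (M+1) (List.replicate (N+1) (0:Int)) with hT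
  have hTlen : T.length = M + 1 := by simp [hT]
  have hTrow : ∀ a, a < M + 1 → T[a]? = some (List.replicate (N+1) (0:Int)) := by
    intro a ha
    simp [hT, ha]
  have hrows : ∀ a, a < M + 1 → ((pvSet2 T 1 1 1).getD a []).length = N + 1 := by
    intro a ha
    by_cases ha1 : a = 1
    · subst ha1
      rw [List.getD, rowSet_self T 1 1 1 (by omega)]
      simp [hTrow 1 (by omega)]
    · rw [List.getD, rowSet_ne T 1 1 a 1 ha1, hTrow a ha]
      simp
  have hzero : ∀ a b, a ≤ M → b ≤ N → pvGet2 T a b = 0 := by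
    intro a b ha hb
    simp [pvGet2, List.getD, hTrow a (by omega), hb]
  refine ⟨by simp [length_pvSet2, hTlen], by simp [length_pvSet2, hTlen], hrows, hrows,
    fun a b ha hb => ?_⟩
  by_cases hab : a = 1 ∧ b = 1
  · obtain ⟨rfl, rfl⟩ := hab
    have hv : pvVal city 0 0 1 1 = ((1:Int), (1:Int)) := by
      unfold pvVal
      rw [if_neg (by omega), if_pos ⟨rfl, rfl⟩]
    have hg : pvGet2 (pvSet2 T 1 1 1) 1 1 = 1 :=
      pvGet2_set2_self T 1 1 1 (by omega)
        (by simp [List.getD, hTrow 1 (by omega)]; omega)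
    rw [hv, hg]
    exact ⟨rfl, rfl⟩
  · have hv : pvVal city 0 0 a b = ((0:Int), (0:Int)) := by
      unfold pvVal
      rw [if_neg (by omega), if_neg hab]
    have hg : pvGet2 (pvSet2 T 1 1 1) a b = 0 := by
      rw [pvGet2_set2_ne T 1 1 a b 1 (by tauto), hzero a b ha hb]
    rw [hv, hg]
    exact ⟨rfl, rfl⟩

lemma pvVal_final1 (city : List (List Int)) (M N : Nat) (hM : 1 ≤ M) (hN : 1 ≤ N) :
    (pvVal city M 0 (M-1) N).1 = (pvPair city (M-1) N).1 := by
  unfold pvVal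
  rcases Nat.lt_or_ge M 2 with h2 | h2
  · have : M = 1 := by omega
    subst this
    rw [if_neg (by omega), if_neg (by omega)]
    simp [pvPair]
  · rw [if_pos (Or.inl ⟨by omega, by omega, by omega⟩)]

lemma pvVal_final2 (city : List (List Int)) (M N : Nat) (hM : 1 ≤ M) (hN : 1 ≤ N) :
    (pvVal city M 0 M (N-1)).2 = (pvPair city M (N-1)).2 := by
  unfold pvVal
  rcases Nat.lt_or_ge N 2 with h2 | h2
  · have : N = 1 := by omega
    rw [if_neg (by omega), if_neg (by omega)]
    obtain ⟨M', rfl⟩ : ∃ M', M = M' + 1 := ⟨M - 1, by omega⟩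
    subst this
    simp [pvPair]
  · rw [if_pos (Or.inl ⟨by omega, by omega, by omega⟩)]

-- ===== VERDICT =====
theorem solution_spec : Claim_equal_solution := by
  intro m n city hdom hpre
  obtain ⟨hm, hn, _, _⟩ := hpre
  obtain ⟨M, rfl⟩ : ∃ M : Nat, m = (M:Int) := ⟨m.toNat, (Int.toNat_of_nonneg (by omega)).symm⟩
  obtain ⟨N, rfl⟩ : ∃ N : Nat, n = (N:Int) := ⟨n.toNat, (Int.toNat_of_nonneg (by omega)).symm⟩
  have hM : 1 ≤ M := by omega
  have hN : 1 ≤ N := by omega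
  have eM1 : ((M:Int)+1).toNat = M + 1 := by omega
  have eN1 : ((N:Int)+1).toNat = N + 1 := by omega
  have eMm : ((M:Int)-1).toNat = M - 1 := by omega
  have eNm : ((N:Int)-1).toNat = N - 1 := by omega
  have eM : ((M:Int)).toNat = M := by omega
  have eN : ((N:Int)).toNat = N := by omega
  unfold Spec_solution solution solution_alt
  rw [eM1, eN1, eMm, eNm, eM, eN]
  have hfin := inv_outer city M N _ (inv_init city M N hM hN) M (Nat.le_refl M)
  obtain ⟨h1, h2, h3, h4, h5⟩ := hfin
  have r1 := (h5 (M-1) N (by omega) (Nat.le_refl N)).1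
  have r2 := (h5 M (N-1) (Nat.le_refl M) (by omega)).2
  rw [pvVal_final1 city M N hM hN] at r1
  rw [pvVal_final2 city M N hM hN] at r2
  simp only [r1, r2, pairB_eq]
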